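-- pv_equiv track=rewrite | github.com/mpilhlt/pdf-tei-editor | fastapi/lib/hash_utils.py | find_safe_hash_length
-- ===== SOURCE A (Python) =====
-- def find_safe_hash_length(all_hashes: set) -> int:
--     """
--     Find minimum hash length to avoid collisions.
--
--     Args:
--         all_hashes (set): Set of all full hashes
--
--     Returns:
--         int: Minimum hash length that avoids collisions
--     """
--     if not all_hashes:
--         return 5
--
--     hash_length = 5
--     while hash_length <= 32:  # MD5 hashes are 32 characters
--         shortened_hashes = {h[:hash_length] for h in all_hashes}
--         if len(shortened_hashes) == len(all_hashes):
--             # No collisions at this length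
--             break
--         hash_length += 1
--
--     return hash_length
-- ===== SOURCE B (Python) =====
-- def find_safe_hash_length(all_hashes: set) -> int:
--     """Binary search for the minimum hash length avoiding collisions.
--
--     Distinctness of the length-L prefixes is monotone in L, so instead of
--     scanning L = 5, 6, ..., 32 we binary-search the smallest L in [5, 32]
--     whose prefixes are collision-free; 33 (= past 32) when none is.
--     """
--     if not all_hashes:
--         return 5
--     n = len(all_hashes)
--     lo, hi = 5, 33
--     while lo < hi:
--         mid = (lo + hi) // 2
--         if len({h[:mid] for h in all_hashes}) == n:
--             hi = mid
--         else:
--             lo = mid + 1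
--     return lo
-- ===== Notes on version B (the rewrite author's own statement) =====
-- stated objective: alternative
-- what changed: Replaces the linear scan over lengths 5..32 with a binary search on [5,33] exploiting that prefix-distinctness is monotone in the prefix length, doing at most 5 instead of up to 28 prefix-set constructions.
import Mathlib
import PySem

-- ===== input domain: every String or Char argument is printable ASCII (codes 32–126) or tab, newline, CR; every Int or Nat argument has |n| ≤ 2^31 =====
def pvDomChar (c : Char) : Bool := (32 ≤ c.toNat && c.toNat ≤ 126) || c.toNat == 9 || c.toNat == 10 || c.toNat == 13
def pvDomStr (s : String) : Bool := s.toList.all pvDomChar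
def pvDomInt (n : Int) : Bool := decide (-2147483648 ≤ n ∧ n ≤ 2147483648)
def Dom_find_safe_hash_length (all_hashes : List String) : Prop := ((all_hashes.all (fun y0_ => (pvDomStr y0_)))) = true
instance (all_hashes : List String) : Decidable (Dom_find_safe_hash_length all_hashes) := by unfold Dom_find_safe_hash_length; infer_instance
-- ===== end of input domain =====

-- B replaces A's linear scan over prefix lengths 5..32 by a binary search on [5,33]
-- using that prefix-distinctness is monotone in the length (alternative algorithm).


-- ===== PORT A =====
-- len({h[:L] for h in all_hashes}) == len(all_hashes)  (shared comprehension, used by both Pythons verbatim)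
def fshl_distinctAt (all_hashes : List String) (L : Int) : Bool :=
  (PySem.Set.ofList (all_hashes.map (fun h => PySem.Str.slice h none (some L)))).length == all_hashes.length

-- the 'while hash_length <= 32' loop of A
def fshl_loopA (all_hashes : List String) (L : Int) : Int :=
  if _h : L ≤ 32 then
    if fshl_distinctAt all_hashes L then L
    else fshl_loopA all_hashes (L + 1)
  else L
termination_by (33 - L).toNat
decreasing_by omega

def find_safe_hash_length (all_hashes : List String) : Int :=
  if all_hashes.isEmpty then 5
  else fshl_loopA all_hashes 5

-- ===== PORT B =====
-- the 'while lo < hi' binary-search loop of B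
def fshl_bsearch (all_hashes : List String) (lo hi : Int) : Int :=
  if _h : lo < hi then
    let mid := PySem.Int.floordiv (lo + hi) 2
    if fshl_distinctAt all_hashes mid then fshl_bsearch all_hashes lo mid
    else fshl_bsearch all_hashes (mid + 1) hi
  else lo
termination_by (hi - lo).toNat
decreasing_by
  · have := (PySem.Int.floordiv_two_mid_bounds (le_of_lt _h)).1
    have := (PySem.Int.floordiv_lt_iff_lt_mul (a := lo + hi) (b := 2) (q := hi) (by norm_num)).2 (by omega)
    omega
  · have := (PySem.Int.le_floordiv_iff_mul_le (a := lo + hi) (b := 2) (q := lo) (by norm_num)).2 (by omega)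
    have := (PySem.Int.floordiv_two_mid_bounds (le_of_lt _h)).2
    omega

def find_safe_hash_length_alt (all_hashes : List String) : Int :=
  if all_hashes.isEmpty then 5
  else fshl_bsearch all_hashes 5 33

-- ===== PRECONDITION & SPEC =====
def Spec_find_safe_hash_length (all_hashes : List String) (out : Int) : Prop := out = find_safe_hash_length_alt all_hashes
instance (all_hashes : List String) (out : Int) : Decidable (Spec_find_safe_hash_length all_hashes out) := by unfold Spec_find_safe_hash_length; infer_instance

-- ===== CLAIM (what is proved, stated in full; the proofs are below) =====
def Claim_equal_find_safe_hash_length : Prop := ∀ (all_hashes : List String), Dom_find_safe_hash_length all_hashes → Spec_find_safe_hash_length all_hashes (find_safe_hash_length all_hashes)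

-- ===== LEMMAS AND PROOFS =====

-- the property both loops' results satisfy: first collision-free length in [5,33], 33 if none below 33
def fshl_P (all_hashes : List String) (r : Int) : Prop :=
  5 ≤ r ∧ r ≤ 33 ∧ (r ≤ 32 → fshl_distinctAt all_hashes r = true) ∧
    (∀ K, 5 ≤ K → K < r → fshl_distinctAt all_hashes K = false)

-- full-length prefix set means no duplicate in the ofList argument
theorem fshl_ofList_full_len_nodup : ∀ (ys : List String),
    (PySem.Set.ofList ys).length = ys.length → ys.Nodup := by
  intro ys
  induction ys with
  | nil => simp
  | cons x xs ih =>
    rw [PySem.Set.ofList_cons]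
    simp only [List.length_cons, PySem.Set.discard]
    intro h
    have hle1 : (List.filter (fun y => !y == x) (PySem.Set.ofList xs)).length ≤
        (PySem.Set.ofList xs).length := List.length_filter_le _ _
    have hle2 : (PySem.Set.ofList xs).length ≤ xs.length := PySem.Set.length_ofList_le xs
    have hflen : (List.filter (fun y => !y == x) (PySem.Set.ofList xs)).length =
        (PySem.Set.ofList xs).length := by
      omega
    have hall := (List.length_filter_eq_length_iff).1 hflen
    have hxnot : x ∉ xs := by
      intro hx
      have hx' : x ∈ PySem.Set.ofList xs := (PySem.Set.mem_ofList xs x).2 hx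
      have := hall x hx'
      simp at this
    rw [List.nodup_cons]
    exact ⟨hxnot, ih (by omega)⟩

-- a prefix-set of full length means the prefixes are pairwise distinct
theorem fshl_distinctAt_iff_nodup (all_hashes : List String) (L : Int) :
    fshl_distinctAt all_hashes L = true ↔
      (all_hashes.map (fun h => PySem.Str.slice h none (some L))).Nodup := by
  unfold fshl_distinctAt
  set ys := all_hashes.map (fun h => PySem.Str.slice h none (some L)) with hys
  have hlen : ys.length = all_hashes.length := by simp [hys]
  constructor
  · intro h
    refine fshl_ofList_full_len_nodup ys ?_
    have := of_decide_eq_true (by simpa using h)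
    omega
  · intro h
    rw [PySem.Set.ofList_eq_self_of_nodup ys h]
    simp [hlen]

-- taking the shorter prefix factors through the longer one
theorem fshl_slice_slice (s : String) (L M : Int) (h0 : 0 ≤ L) (hLM : L ≤ M) :
    PySem.Str.slice s none (some L) =
      PySem.Str.slice (PySem.Str.slice s none (some M)) none (some L) := by
  apply String.toList_inj.mp
  simp only [PySem.Str.toList_slice, PySem.Chars.slice_eq_listSlice]
  rw [PySem.List.slice_to _ h0, PySem.List.slice_to _ (by omega : (0:Int) ≤ M),
    PySem.List.slice_to _ h0, List.take_take]
  congr 1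
  omega

-- prefix-distinctness is monotone in the prefix length
theorem fshl_mono (all_hashes : List String) (L M : Int) (h0 : 0 ≤ L) (hLM : L ≤ M)
    (h : fshl_distinctAt all_hashes L = true) : fshl_distinctAt all_hashes M = true := by
  rw [fshl_distinctAt_iff_nodup] at h ⊢
  have heq : all_hashes.map (fun h => PySem.Str.slice h none (some L)) =
      (all_hashes.map (fun h => PySem.Str.slice h none (some M))).map
        (fun s => PySem.Str.slice s none (some L)) := by
    rw [List.map_map]
    exact List.map_congr_left (fun s _ => fshl_slice_slice s L M h0 hLM)
  rw [heq] at h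
  exact h.of_map

-- uniqueness of the fshl_P value
theorem fshl_P_unique (all_hashes : List String) (r₁ r₂ : Int)
    (h₁ : fshl_P all_hashes r₁) (h₂ : fshl_P all_hashes r₂) : r₁ = r₂ := by
  obtain ⟨a1, b1, c1, d1⟩ := h₁
  obtain ⟨a2, b2, c2, d2⟩ := h₂
  by_contra hne
  rcases lt_or_gt_of_ne hne with h | h
  · have := d2 r₁ a1 h; have := c1 (by omega); simp_all
  · have := d1 r₂ a2 h; have := c2 (by omega); simp_all

theorem fshl_loopA_P (all_hashes : List String) (L : Int) :
    5 ≤ L → L ≤ 33 → (∀ K, 5 ≤ K → K < L → fshl_distinctAt all_hashes K = false) →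
    fshl_P all_hashes (fshl_loopA all_hashes L) := by
  induction L using fshl_loopA.induct (all_hashes := all_hashes) with
  | case1 L hle hok =>
    intro h5 _ hbelow
    rw [fshl_loopA]; simp only [hle, dif_pos]; rw [if_pos hok]
    exact ⟨h5, by omega, fun _ => hok, hbelow⟩
  | case2 L hle hok ih =>
    intro h5 _ hbelow
    rw [fshl_loopA]; simp only [hle, dif_pos]; rw [if_neg hok]
    refine ih (by omega) (by omega) ?_
    intro K hK5 hKL
    rcases lt_or_eq_of_le (by omega : K ≤ L) with h | h
    · exact hbelow K hK5 h
    · rw [h]; exact eq_false_of_ne_true hok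
  | case3 L hgt =>
    intro h5 h33 hbelow
    rw [fshl_loopA]; simp only [hgt, reduceDIte]
    have : L = 33 := by omega
    subst this
    exact ⟨by omega, by omega, by omega, hbelow⟩

theorem fshl_bsearch_P (all_hashes : List String) (lo hi : Int) :
    5 ≤ lo → lo ≤ hi → hi ≤ 33 →
    (∀ K, 5 ≤ K → K < lo → fshl_distinctAt all_hashes K = false) →
    (hi = 33 ∨ fshl_distinctAt all_hashes hi = true) →
    fshl_P all_hashes (fshl_bsearch all_hashes lo hi) := by
  induction lo, hi using fshl_bsearch.induct (all_hashes := all_hashes) with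
  | case1 lo hi hlt mid hok ih =>
    intro h5 hlohi h33 hbelow _
    have hb := PySem.Int.floordiv_two_mid_bounds (lo := lo) (hi := hi) (le_of_lt hlt)
    rw [fshl_bsearch]; simp only [hlt, dif_pos]; rw [if_pos hok]
    exact ih h5 (by omega) (by omega) hbelow (Or.inr hok)
  | case2 lo hi hlt mid hok ih =>
    intro h5 hlohi h33 hbelow hhi
    have hb := PySem.Int.floordiv_two_mid_bounds (lo := lo) (hi := hi) (le_of_lt hlt)
    have hmidlt : mid < hi :=
      (PySem.Int.floordiv_lt_iff_lt_mul (a := lo + hi) (b := 2) (q := hi) (by norm_num)).2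
        (by omega)
    rw [fshl_bsearch]; simp only [hlt, dif_pos]; rw [if_neg hok]
    refine ih (by omega) (by omega) h33 ?_ hhi
    intro K hK5 hKlt
    cases hK : fshl_distinctAt all_hashes K with
    | false => rfl
    | true =>
      exact absurd (fshl_mono all_hashes K mid (by omega) (by omega) hK) hok
  | case3 lo hi hge =>
    intro h5 hlohi h33 hbelow hhi
    rw [fshl_bsearch]; simp only [hge, reduceDIte]
    have : lo = hi := by omega
    subst this
    refine ⟨h5, h33, ?_, hbelow⟩
    intro hle
    rcases hhi with h | h
    · omega
    · exact h

-- ===== VERDICT (by name: the statement is the Claim_ definition above) =====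
theorem find_safe_hash_length_spec : Claim_equal_find_safe_hash_length := by
  intro all_hashes _
  unfold Spec_find_safe_hash_length find_safe_hash_length find_safe_hash_length_alt
  by_cases hemp : all_hashes.isEmpty
  · simp [hemp]
  · simp only [hemp, Bool.false_eq_true, not_false_eq_true, if_neg]
    exact fshl_P_unique all_hashes _ _
      (fshl_loopA_P all_hashes 5 (by omega) (by omega) (fun K h1 h2 => by omega))
      (fshl_bsearch_P all_hashes 5 33 (by omega) (by omega) (by omega)
        (fun K h1 h2 => by omega) (Or.inl rfl))
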